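-- pv_equiv track=rewrite | github.com/iamnishantchandra/DSA-QA-Using-Python | 10X/Python/Array/Remove_3.py | arrToInt
-- ===== SOURCE A (Python) =====
-- def arrToInt(arr):
--     #complete this function
--     sumo=0
--     for i in arr:
--         if i==0:
--             sumo*=10
--         elif i==3:
--             pass
--         else:
--             sumo=sumo*10+i
--
--     return sumo
-- ===== SOURCE B (Python) =====
-- def arrToInt(arr):
--     kept = [i for i in arr if i != 3]
--     total, p = 0, 1
--     for d in reversed(kept):
--         total += d * p
--         p *= 10
--     return total
-- ===== Notes on version B (the rewrite author's own statement) =====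
-- stated objective: alternative
-- what changed: Replaces the Horner-style forward shifting accumulator with a one-shot filter of the non-3 elements followed by a back-to-front positional sum with a running power-of-10 multiplier.
import Mathlib
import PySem

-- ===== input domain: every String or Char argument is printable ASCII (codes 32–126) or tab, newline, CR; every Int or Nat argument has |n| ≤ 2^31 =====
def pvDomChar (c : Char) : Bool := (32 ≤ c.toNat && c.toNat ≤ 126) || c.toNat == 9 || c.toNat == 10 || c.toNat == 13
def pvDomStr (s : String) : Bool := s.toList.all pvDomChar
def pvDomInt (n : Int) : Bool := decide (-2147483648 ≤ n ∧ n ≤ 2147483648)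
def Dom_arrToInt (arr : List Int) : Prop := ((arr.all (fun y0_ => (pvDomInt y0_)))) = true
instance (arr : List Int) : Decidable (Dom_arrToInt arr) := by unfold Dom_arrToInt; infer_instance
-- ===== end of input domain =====

-- B replaces A's forward Horner shifting accumulator with a filter + back-to-front positional sum carrying a running power-of-10 multiplier (alternative decomposition, same cost).

-- ===== PORT A =====
def arrToInt (arr : List Int) : Int :=
  arr.foldl (fun sumo i =>
    if i = 0 then sumo * 10
    else if i = 3 then sumo
    else sumo * 10 + i) 0

-- ===== PORT B =====
def arrToInt_alt (arr : List Int) : Int :=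
  let kept := arr.filter (fun i => i ≠ 3)
  (kept.reverse.foldl (fun (tp : Int × Int) d => (tp.1 + d * tp.2, tp.2 * 10)) (0, 1)).1

-- ===== PRECONDITION & SPEC =====
def Spec_arrToInt (arr : List Int) (out : Int) : Prop := out = arrToInt_alt arr
instance (arr : List Int) (out : Int) : Decidable (Spec_arrToInt arr out) := by unfold Spec_arrToInt; infer_instance

-- ===== CLAIM (what is proved, stated in full; the proofs are below) =====
def Claim_equal_arrToInt : Prop := ∀ (arr : List Int), Dom_arrToInt arr → Spec_arrToInt arr (arrToInt arr)

-- ===== LEMMAS AND PROOFS =====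

-- positional value of a digit list: hsum (d :: t) = hsum t + d * 10 ^ |t|
def hsum : List Int → Int
  | [] => 0
  | d :: t => hsum t + d * 10 ^ t.length

theorem filter_fold (arr : List Int) (acc : Int) :
    arr.foldl (fun sumo i =>
      if i = 0 then sumo * 10
      else if i = 3 then sumo
      else sumo * 10 + i) acc
    = (arr.filter (fun i => i ≠ 3)).foldl (fun sumo i => sumo * 10 + i) acc := by
  induction arr generalizing acc with
  | nil => simp
  | cons x t ih =>
    by_cases h3 : x = 3
    · subst h3; simp [ih]
    · by_cases h0 : x = 0
      · subst h0; simp [List.filter, ih]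
      · simp [List.filter, h3, h0, ih]

theorem revfold (l : List Int) :
    l.reverse.foldl (fun (tp : Int × Int) d => (tp.1 + d * tp.2, tp.2 * 10)) (0, 1)
      = (hsum l, 10 ^ l.length) := by
  induction l with
  | nil => simp [hsum]
  | cons d t ih =>
    simp only [List.reverse_cons, List.foldl_append, ih, List.foldl_cons, List.foldl_nil,
      hsum, List.length_cons]
    exact Prod.ext (by ring) (by ring)

theorem horner_hsum (l : List Int) : ∀ (acc : Int),
    l.foldl (fun sumo i => sumo * 10 + i) acc = acc * 10 ^ l.length + hsum l := by
  induction l with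
  | nil => intro acc; simp [hsum]
  | cons d t ih =>
    intro acc
    simp only [List.foldl_cons, List.length_cons, hsum]
    rw [ih (acc * 10 + d)]
    ring

-- ===== VERDICT (by name: the statement is the Claim_ definition above) =====
theorem arrToInt_spec : Claim_equal_arrToInt := by
  intro arr _
  unfold Spec_arrToInt arrToInt arrToInt_alt
  rw [filter_fold, horner_hsum]
  show _ = (List.foldl _ (0, 1) (List.reverse _)).1
  rw [revfold]
  ring
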